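-- pv_equiv track=rewrite | github.com/barmenteros/aimo2_project | src/utils/math_helpers.py | mean_mod
-- ===== SOURCE A (Python) =====
-- from typing import List, Optional, Tuple, Set, Dict
--
-- def mod_inverse(a: int, m: int) -> Optional[int]:
--     """
--     Calculate modular multiplicative inverse.
--
--     Args:
--         a: Number to find inverse of
--         m: Modulus
--
--     Returns:
--         Optional[int]: Modular multiplicative inverse if exists
--     """
--     def extended_gcd(a: int, b: int) -> Tuple[int, int, int]:
--         if a == 0:
--             return b, 0, 1
--         gcd, x1, y1 = extended_gcd(b % a, a)
--         x = y1 - (b // a) * x1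
--         y = x1
--         return gcd, x, y
--
--     g, x, _ = extended_gcd(a, m)
--     if g != 1:
--         return None
--     return (x % m + m) % m
--
-- def mean_mod(numbers: List[int], m: int = 1000) -> int:
--     """
--     Calculate mean modulo m.
--
--     Args:
--         numbers: List of numbers
--         m: Modulus (default 1000)
--
--     Returns:
--         int: Mean modulo m
--     """
--     if not numbers:
--         return 0
--     total = sum(x % m for x in numbers) % m
--     inv = mod_inverse(len(numbers), m)
--     if inv is None:
--         return 0
--     return (total * inv) % m
-- ===== SOURCE B (Python) =====
-- def mean_mod(numbers, m=1000):
--     if not numbers: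
--         return 0
--     n = len(numbers)
--     # iterative extended Euclid: Bezout coefficient of n w.r.t. m
--     old_r, r = n, m
--     old_s, s = 1, 0
--     while r != 0:
--         q = old_r // r
--         old_r, r = r, old_r - q * r
--         old_s, s = s, old_s - q * s
--     if old_r < 0:
--         old_r, old_s = -old_r, -old_s
--     if old_r != 1:
--         return 0
--     return (sum(numbers) * old_s) % m
-- ===== Notes on version B (the rewrite author's own statement) =====
-- stated objective: faster
-- what changed: Replaces the recursive extended-gcd helper with an inline iterative Bezout loop (with sign normalisation of the gcd) and replaces the per-element 'sum(x % m) % m then multiply by normalised inverse' pipeline by a single plain sum multiplied by the raw Bezout coefficient, reduced mod m once.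
import Mathlib
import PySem

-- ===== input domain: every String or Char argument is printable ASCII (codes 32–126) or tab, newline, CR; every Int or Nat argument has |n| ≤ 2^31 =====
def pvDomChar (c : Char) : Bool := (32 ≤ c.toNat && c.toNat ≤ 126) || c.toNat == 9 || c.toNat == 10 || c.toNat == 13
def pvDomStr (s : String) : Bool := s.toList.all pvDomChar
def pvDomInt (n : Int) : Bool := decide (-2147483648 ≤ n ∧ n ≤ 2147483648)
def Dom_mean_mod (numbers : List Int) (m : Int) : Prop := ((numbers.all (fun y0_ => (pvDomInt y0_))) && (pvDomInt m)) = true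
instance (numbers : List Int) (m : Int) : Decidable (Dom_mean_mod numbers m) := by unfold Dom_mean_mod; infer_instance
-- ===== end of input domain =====

-- B replaces A's recursive extended-gcd helper by an inline iterative Bezout loop and a single
-- plain sum reduced mod m once (measured faster by a constant factor: no per-element mod pass).

-- termination measure fact used by both ports' recursions
theorem pvMod_natAbs_lt (b a : Int) (ha : a ≠ 0) :
    (PySem.Int.mod b a).natAbs < a.natAbs := by
  rcases lt_or_gt_of_ne ha with h | h
  · have := PySem.Int.mod_neg_bounds b h
    omega
  · have h1 := PySem.Int.mod_nonneg b h
    have h2 := PySem.Int.mod_lt b h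
    omega

-- ===== PORT A =====
def extended_gcd (a b : Int) : Int × Int × Int :=
  if h : a = 0 then (b, 0, 1)
  else
    let r := extended_gcd (PySem.Int.mod b a) a
    let gcd := r.1; let x1 := r.2.1; let y1 := r.2.2
    (gcd, y1 - (PySem.Int.floordiv b a) * x1, x1)
termination_by a.natAbs
decreasing_by exact pvMod_natAbs_lt b a h

def mod_inverse (a m : Int) : Option Int :=
  let r := extended_gcd a m
  let g := r.1; let x := r.2.1
  if g ≠ 1 then none
  else some (PySem.Int.mod (PySem.Int.mod x m + m) m)

def mean_mod (numbers : List Int) (m : Int) : Int :=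
  if numbers = [] then 0
  else
    let total := PySem.Int.mod (numbers.foldl (fun acc x => acc + PySem.Int.mod x m) 0) m
    match mod_inverse (numbers.length : Int) m with
    | none => 0
    | some inv => PySem.Int.mod (total * inv) m

-- ===== PORT B =====
def bezout_loop (old_r r old_s s : Int) : Int × Int :=
  if h : r = 0 then (old_r, old_s)
  else
    let q := PySem.Int.floordiv old_r r
    bezout_loop r (old_r - q * r) s (old_s - q * s)
termination_by r.natAbs
decreasing_by
  have := pvMod_natAbs_lt old_r r h
  have hm := PySem.Int.floordiv_mul_add_mod old_r r
  have : (old_r - PySem.Int.floordiv old_r r * r) = PySem.Int.mod old_r r := by omega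
  omega

def mean_mod_alt (numbers : List Int) (m : Int) : Int :=
  if numbers = [] then 0
  else
    let n : Int := numbers.length
    let p := bezout_loop n m 1 0
    let p' := if p.1 < 0 then (-p.1, -p.2) else p
    if p'.1 ≠ 1 then 0
    else PySem.Int.mod (numbers.sum * p'.2) m

-- ===== PRECONDITION & SPEC =====
-- Pre_ excludes nonempty lists with m = 0, on which Python A raises ZeroDivisionError.
def Pre_mean_mod (numbers : List Int) (m : Int) : Prop := numbers = [] ∨ m ≠ 0
instance (numbers : List Int) (m : Int) : Decidable (Pre_mean_mod numbers m) := by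
  unfold Pre_mean_mod; infer_instance
def pvWitness_mean_mod : List Int × Int := ([1, 2, 3], 7)

def Spec_mean_mod (numbers : List Int) (m : Int) (out : Int) : Prop := out = mean_mod_alt numbers m
instance (numbers : List Int) (m : Int) (out : Int) : Decidable (Spec_mean_mod numbers m out) := by unfold Spec_mean_mod; infer_instance

-- ===== CLAIM (what is proved, stated in full; the proofs are below) =====
def Claim_equal_mean_mod : Prop := ∀ (numbers : List Int) (m : Int), Dom_mean_mod numbers m → Pre_mean_mod numbers m → Spec_mean_mod numbers m (mean_mod numbers m)

-- ===== LEMMAS AND PROOFS =====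

-- m divides (a % m) - a, for every m (floor-mod identity)
theorem pvModSub (a m : Int) : m ∣ PySem.Int.mod a m - a := by
  have h := PySem.Int.floordiv_mul_add_mod a m
  exact ⟨-(PySem.Int.floordiv a m), by linarith⟩

-- congruent arguments have the same floor mod (m ≠ 0)
theorem pvModCong (m u v : Int) (hm : m ≠ 0) (h : m ∣ u - v) :
    PySem.Int.mod u m = PySem.Int.mod v m := by
  have hu := PySem.Int.floordiv_mul_add_mod u m
  have hv := PySem.Int.floordiv_mul_add_mod v m
  obtain ⟨c, hc⟩ := h
  have hd : m ∣ (PySem.Int.mod u m - PySem.Int.mod v m) :=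
    ⟨c - PySem.Int.floordiv u m + PySem.Int.floordiv v m, by linarith [mul_add m c (PySem.Int.floordiv v m - PySem.Int.floordiv u m), mul_sub m c (PySem.Int.floordiv u m), mul_comm m c]⟩
  have hz : PySem.Int.mod u m - PySem.Int.mod v m = 0 := by
    refine Int.eq_zero_of_dvd_of_natAbs_lt_natAbs hd ?_
    rcases lt_or_gt_of_ne hm with h' | h'
    · have b1 := PySem.Int.mod_neg_bounds u h'
      have b2 := PySem.Int.mod_neg_bounds v h'
      omega
    · have b1 := PySem.Int.mod_nonneg u h'
      have b2 := PySem.Int.mod_lt u h'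
      have b3 := PySem.Int.mod_nonneg v h'
      have b4 := PySem.Int.mod_lt v h'
      omega
  omega

theorem pvMulCong (m a a' b b' : Int) (h1 : m ∣ a - a') (h2 : m ∣ b - b') :
    m ∣ a * b - a' * b' := by
  have : a * b - a' * b' = a * (b - b') + (a - a') * b' := by ring
  rw [this]
  exact dvd_add (Dvd.dvd.mul_left h2 a) (Dvd.dvd.mul_right h1 b')

-- A's extended_gcd returns a Bezout identity
theorem egcd_bezout (a b : Int) :
    (extended_gcd a b).2.1 * a + (extended_gcd a b).2.2 * b = (extended_gcd a b).1 := by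
  by_cases h : a = 0
  · rw [extended_gcd]; simp [h]
  · rw [extended_gcd]; simp only [h, dite_false]
    have ih := egcd_bezout (PySem.Int.mod b a) a
    have hd := PySem.Int.floordiv_mul_add_mod b a
    linear_combination ih - (extended_gcd (PySem.Int.mod b a) a).2.1 * hd
termination_by a.natAbs
decreasing_by exact pvMod_natAbs_lt b a h

-- A's extended_gcd computes the (nonnegative) gcd when 0 ≤ a, 0 < b
theorem egcd_gcd_pos (a b : Int) (ha : 0 ≤ a) (hb : 0 < b) :
    (extended_gcd a b).1 = (Int.gcd a b : Int) := by
  by_cases h : a = 0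
  · rw [extended_gcd]
    simp [h, Int.natAbs_of_nonneg hb.le]
  · have hapos : 0 < a := lt_of_le_of_ne ha (Ne.symm h)
    rw [extended_gcd]; simp only [h, dite_false]
    have ih := egcd_gcd_pos (PySem.Int.mod b a) a (PySem.Int.mod_nonneg b hapos) hapos
    rw [ih]
    congr 1
    have hd := PySem.Int.floordiv_mul_add_mod b a
    have hm : PySem.Int.mod b a = b - PySem.Int.floordiv b a * a := by linarith
    rw [hm, Int.gcd_sub_mul_right_left a b (PySem.Int.floordiv b a), Int.gcd_comm]
termination_by a.natAbs
decreasing_by exact pvMod_natAbs_lt b a h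

-- top-level call: first argument positive, any second argument
theorem egcd_gcd_top (a b : Int) (ha : 0 < a) :
    (extended_gcd a b).1 = (Int.gcd a b : Int) := by
  have h : a ≠ 0 := ha.ne'
  rw [extended_gcd]; simp only [h, dite_false]
  rw [egcd_gcd_pos (PySem.Int.mod b a) a (PySem.Int.mod_nonneg b ha) ha]
  congr 1
  have hd := PySem.Int.floordiv_mul_add_mod b a
  have hm : PySem.Int.mod b a = b - PySem.Int.floordiv b a * a := by linarith
  rw [hm, Int.gcd_sub_mul_right_left a b (PySem.Int.floordiv b a), Int.gcd_comm]

-- B's loop invariant: Bezout coefficient and gcd preservation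
theorem bezout_loop_inv (r old_r old_s s n m : Int)
    (h1 : ∃ t, old_s * n + t * m = old_r) (h2 : ∃ t, s * n + t * m = r)
    (h3 : Int.gcd old_r r = Int.gcd n m) :
    (∃ t, (bezout_loop old_r r old_s s).2 * n + t * m = (bezout_loop old_r r old_s s).1)
    ∧ ((bezout_loop old_r r old_s s).1).natAbs = Int.gcd n m := by
  by_cases h : r = 0
  · rw [bezout_loop]; simp only [h, dite_true]
    refine ⟨h1, ?_⟩
    subst h
    rw [Int.gcd_zero_right] at h3
    exact h3
  · rw [bezout_loop]; simp only [h, dite_false]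
    obtain ⟨t1, ht1⟩ := h1
    obtain ⟨t2, ht2⟩ := h2
    refine bezout_loop_inv _ _ _ _ n m ⟨t2, ht2⟩
      ⟨t1 - PySem.Int.floordiv old_r r * t2, by linear_combination ht1 - (PySem.Int.floordiv old_r r) * ht2⟩ ?_
    rw [Int.gcd_comm r _, Int.gcd_sub_mul_right_left r old_r (PySem.Int.floordiv old_r r)]
    exact h3
termination_by r.natAbs
decreasing_by
  have h1 := pvMod_natAbs_lt old_r r h
  have h2 := PySem.Int.floordiv_mul_add_mod old_r r
  have : (old_r - PySem.Int.floordiv old_r r * r) = PySem.Int.mod old_r r := by linarith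
  omega

-- the per-element-mod left fold is congruent to the plain sum
theorem foldl_mod_cong (m : Int) (xs : List Int) : ∀ acc : Int,
    m ∣ (xs.foldl (fun a x => a + PySem.Int.mod x m) acc - (acc + xs.sum)) := by
  induction xs with
  | nil => intro acc; simp
  | cons x xs ih =>
    intro acc
    have h1 := ih (acc + PySem.Int.mod x m)
    have h2 := pvModSub x m
    simp only [List.foldl_cons, List.sum_cons]
    obtain ⟨c1, hc1⟩ := h1
    obtain ⟨c2, hc2⟩ := h2
    exact ⟨c1 + c2, by linear_combination hc1 + hc2⟩

-- ===== VERDICT (by name: the statement is the Claim_ definition above) =====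
theorem mean_mod_spec : Claim_equal_mean_mod := by
  intro numbers m _ hpre
  unfold Spec_mean_mod
  by_cases hnil : numbers = []
  · simp [mean_mod, mean_mod_alt, hnil]
  · have hm : m ≠ 0 := hpre.resolve_left hnil
    have hlen : 0 < ((numbers.length : Int)) := by
      cases numbers with
      | nil => exact absurd rfl hnil
      | cons a l => simp
    obtain ⟨⟨t, hbz⟩, habs⟩ :=
      bezout_loop_inv m ((numbers.length : Int)) 1 0 ((numbers.length : Int)) m
        ⟨0, by ring⟩ ⟨1, by ring⟩ rfl
    simp only [mean_mod, mean_mod_alt, mod_inverse, hnil, if_false]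
    rw [egcd_gcd_top _ m hlen]
    set p := bezout_loop ((numbers.length : Int)) m 1 0 with hp
    set x := (extended_gcd ((numbers.length : Int)) m).2.1 with hx
    set y := (extended_gcd ((numbers.length : Int)) m).2.2 with hy
    have hba := egcd_bezout ((numbers.length : Int)) m
    rw [egcd_gcd_top _ m hlen] at hba
    have hg' : (if p.1 < 0 then (-p.1, -p.2) else p).1 = (Int.gcd ((numbers.length : Int)) m : Int) := by
      by_cases hneg : p.1 < 0
      · rw [if_pos hneg]
        show -p.1 = ((Int.gcd ((numbers.length : Int)) m : Nat) : Int)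
        omega
      · rw [if_neg hneg]
        omega
    have hbz' : ∃ t', (if p.1 < 0 then (-p.1, -p.2) else p).2 * ((numbers.length : Int)) + t' * m
        = (Int.gcd ((numbers.length : Int)) m : Int) := by
      by_cases hneg : p.1 < 0
      · rw [if_pos hneg]
        refine ⟨-t, ?_⟩
        show -p.2 * ((numbers.length : Int)) + -t * m = _
        have h1 : -p.1 = ((Int.gcd ((numbers.length : Int)) m : Nat) : Int) := by omega
        linear_combination -hbz + h1
      · rw [if_neg hneg]
        refine ⟨t, ?_⟩
        have h1 : p.1 = ((Int.gcd ((numbers.length : Int)) m : Nat) : Int) := by omega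
        linear_combination hbz + h1
    obtain ⟨t', hbz'⟩ := hbz'
    rw [hg']
    by_cases hG1 : Int.gcd ((numbers.length : Int)) m = 1
    · have hgi : ((Int.gcd ((numbers.length : Int)) m : Nat) : Int) = 1 := by exact_mod_cast hG1
      rw [hgi] at hba hbz' ⊢
      simp only [ne_eq, not_true_eq_false, if_false]
      -- both sides are floor-mods of congruent products
      have hxs : m ∣ x - (if p.1 < 0 then (-p.1, -p.2) else p).2 := by
        have h2 : m ∣ (x - (if p.1 < 0 then (-p.1, -p.2) else p).2) * ((numbers.length : Int)) :=
          ⟨t' - y, by linear_combination hba - hbz'⟩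
        exact Int.dvd_of_dvd_mul_left_of_gcd_one h2 (by rw [Int.gcd_comm]; exact hG1)
      have hTS : m ∣ (numbers.foldl (fun a x => a + PySem.Int.mod x m) 0) - numbers.sum := by
        have h := foldl_mod_cong m numbers 0
        simpa using h
      have htot : m ∣ PySem.Int.mod (numbers.foldl (fun a x => a + PySem.Int.mod x m) 0) m
          - numbers.sum := by
        obtain ⟨c1, hc1⟩ := pvModSub (numbers.foldl (fun a x => a + PySem.Int.mod x m) 0) m
        obtain ⟨c2, hc2⟩ := hTS
        exact ⟨c1 + c2, by linear_combination hc1 + hc2⟩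
      have hinv : m ∣ PySem.Int.mod (PySem.Int.mod x m + m) m
          - (if p.1 < 0 then (-p.1, -p.2) else p).2 := by
        obtain ⟨c1, hc1⟩ := pvModSub x m
        obtain ⟨c2, hc2⟩ := pvModSub (PySem.Int.mod x m + m) m
        obtain ⟨c3, hc3⟩ := hxs
        exact ⟨c1 + c2 + c3 + 1, by linear_combination hc1 + hc2 + hc3⟩
      exact pvModCong m _ _ hm (pvMulCong m _ _ _ _ htot hinv)
    · have hgi : ((Int.gcd ((numbers.length : Int)) m : Nat) : Int) ≠ 1 := by
        intro h; exact hG1 (by exact_mod_cast h)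
      simp [hgi]
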